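-- pv_equiv track=rewrite | github.com/bssrdf/pyleet | NumberofWaystoBuildSturdyBrickWall.py | buildWall
-- ===== SOURCE A (Python) =====
-- def buildWall(height, width, bricks):
--     # 本题的突破口在于width<=10，这暗示我们可以用一个10bit的01二进制数来表示“长度为w的线段
--     # 可以如何切割为若干段”。那么如何用一串01既来表示“用了哪些长度的砖”、又可以
--     # 描述“这些砖是怎么排列的”呢？方法就是着眼于那些可能是切缝的位置。
--
--     # 例如长度为w，就有w-1个潜在的切缝位置（编号是0到w-2），我们用1表示这确实是个两块砖
--     # 之间的缝，0则表示这个位置属于一块完整的砖无法切割。特别注意，我们需要虚拟地添加上左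
--     # 边缘的位置（想象成第-1个切缝位置）和右边缘的位置（想象成第w-1个切缝位置）。
--
--     # 比如w=6，那么内部有五个切缝位置，假设是10010，表示切缝位置0、3是砖与砖的交界处。另外
--     # 加上左边缘-1和右边缘5，所以总共有四个交界位置：-1,0,3,5，这说明有三块长度分别是1、3、2的
--     # 砖拼接起来。也就是说，任意两个1之间的index之差，表示了中间有多少块砖。
--
--     # 考虑到w很小，我们穷举所有对w的切割方案，看看切割出来的每一小段是否存在于bricks里面。都
--     # 存在的话就是一个合法的切割（拼接）方案。
--
--     # 我们得到所有合法的切割方案之后（用bitmask的形式表示），就是常规的状态压缩DP。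
--     # 我们用dp[i][state]表示第i层用state这种拼接方式的话可以有多少种方案。
--     # 显然dp[i][state]+=dp[i-1][state1]其中state1和state不能在同一个切缝位置上都是
--     # 拼接点，也就是说必须满足(state & state1) == 0。这个思想和paint house非常相似，
--     # 在那道题里，任何相邻的房子不能是同一种颜色。
--
--     # 最终答案是 sum{dp[height-1][state]} for all states
--     b = set(bricks)
--     plans = []
--     m, MOD = width - 1, 10**9+7
--     for state in range(1<<m):
--         temp = [-1]
--         for i in range(m):
--             if state & (1 << i):
--                 temp.append(i)
--         temp.append(m)
--         flag = True
--         for i in range(1, len(temp)):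
--             if temp[i]-temp[i-1] not in b:
--                 flag = False
--                 break
--         if flag: plans.append(state)
--     n, ret = len(plans), 0
--     dp  = [[0]*n for _ in range(height)]
--     for j in range(n):
--         dp[0][j] = 1
--     for i in range(1, height):
--         for j in range(n):
--             for k in range(n):
--                 if plans[j] & plans[k] == 0:
--                     dp[i][j] = (dp[i][j] + dp[i-1][k]) % MOD
--     for j in range(n):
--         ret = (ret + dp[-1][j]) % MOD
--     return ret
-- ===== SOURCE B (Python) =====
-- def buildWall(height, width, bricks):
--     # Different algorithm for the layer transfer: instead of the O(n^2) pairwise scan over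
--     # all compatible plan pairs, each new layer value is obtained by summing the previous
--     # dict over all submasks of the complement mask, via a branching recursion on bit positions.
--     MOD = 10 ** 9 + 7
--     b = set(bricks)
--     m = width - 1
--     full = (1 << m) - 1
--     plans = []
--     for state in range(1 << m):
--         prev, good = -1, True
--         for i in range(m):
--             if state >> i & 1:
--                 if i - prev not in b:
--                     good = False
--                     break
--                 prev = i
--         if good and m - prev in b:
--             plans.append(state)
--
--     def subsum(i, ch, c, dp):
--         # sum of dp.get(ch | t, 0) over all submasks t of (c restricted to bits < i)
--         if i == 0:
--             return dp.get(ch, 0)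
--         bit = 1 << (i - 1)
--         if c & bit:
--             return subsum(i - 1, ch, c, dp) + subsum(i - 1, ch | bit, c, dp)
--         return subsum(i - 1, ch, c, dp)
--
--     dp = {p: 1 for p in plans}
--     for _ in range(height - 1):
--         dp = {p: subsum(m, 0, full ^ p, dp) % MOD for p in plans}
--     return sum(dp.values()) % MOD
-- ===== Notes on version B (the rewrite author's own statement) =====
-- stated objective: alternative
-- what changed: B computes each layer transfer by a recursive sum of the previous layer's dict values over all submasks of the complement mask (O(3^m) per layer via a branch-on-each-bit recursion on a dict keyed by plan mask) instead of A's O(n^2) pairwise compatibility scan over an indexed 2D table, and validates row plans with a single left-to-right bit scan instead of A's build-cut-list-then-check pass.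
-- outside the precondition, e.g. on buildWall(0, 1, []): A returns 0, B returns 0
import Mathlib
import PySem

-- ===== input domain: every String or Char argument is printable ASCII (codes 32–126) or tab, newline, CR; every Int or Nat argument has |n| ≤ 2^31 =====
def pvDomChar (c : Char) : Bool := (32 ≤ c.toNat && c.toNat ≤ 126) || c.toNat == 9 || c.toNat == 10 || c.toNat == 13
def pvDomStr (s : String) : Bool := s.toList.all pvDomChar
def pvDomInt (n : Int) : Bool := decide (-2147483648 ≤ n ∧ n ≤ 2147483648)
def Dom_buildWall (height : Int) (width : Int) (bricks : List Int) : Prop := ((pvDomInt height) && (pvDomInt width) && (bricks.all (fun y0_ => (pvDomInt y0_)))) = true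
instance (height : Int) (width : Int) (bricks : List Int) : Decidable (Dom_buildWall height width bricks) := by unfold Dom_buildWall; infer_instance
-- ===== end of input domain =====

-- B replaces A's O(n^2) pairwise layer transfer by a per-plan recursive sum over the submasks
-- of the complement mask (and stores layer values in a dict keyed by plan mask); the row-plan
-- validity test is a single left-to-right scan instead of A's build-cut-list-then-check pass.

-- ===== PORT A =====
-- Python's `x << k` / `x >> k` for the nonnegative shift amounts used here
def pvShl (a : Int) (n : Nat) : Int := a <<< n
def pvShr (a : Int) (n : Nat) : Int := a >>> n
-- `&`, `|`, `^` are PySem.Int.band / bor / bxor (Python-exact)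
-- A's per-state validity check (the `temp`/`flag` part of A's loop body)
def pvCheckA (b : List Int) (m : Int) (state : Int) : Bool :=
  let temp : List Int :=
    [-1] ++ (PySem.List.pyRange 0 m 1).foldl
      (fun t i => if PySem.Int.band state (pvShl 1 i.toNat) ≠ 0 then t ++ [i] else t) [] ++ [m]
  (PySem.List.pyRange 1 (PySem.List.len temp) 1).foldl
    (fun fl i =>
      if fl then decide ((PySem.List.pyGetD temp i 0 - PySem.List.pyGetD temp (i - 1) 0) ∈ b)
      else false) true

def buildWall (height : Int) (width : Int) (bricks : List Int) : Int :=
  let b := PySem.Set.ofList bricks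
  let m := width - 1
  let MOD : Int := 1000000007
  -- for state in range(1 << m): … if flag: plans.append(state)   (1 << m exact for m ≥ 0, i.e. under Pre_)
  let plans := (PySem.List.pyRange 0 (pvShl 1 m.toNat) 1).foldl
    (fun acc state => if pvCheckA b m state then acc ++ [state] else acc) []
  -- dp[0][j] = 1  (rows 1.. start as zeros and are fully overwritten; we carry the previous row)
  let dp0 : List Int := plans.map (fun _ => (1:Int))
  let last := (PySem.List.pyRange 1 height 1).foldl
    (fun prev _i =>
      plans.map (fun pj =>
        (plans.zip prev).foldl
          (fun acc kv =>
            if PySem.Int.band pj kv.1 = 0 then PySem.Int.mod (acc + kv.2) MOD else acc) 0)) dp0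
  last.foldl (fun r v => PySem.Int.mod (r + v) MOD) 0

-- ===== PORT B =====
-- B's per-state validity check: one scan keeping (prev cut position, still good)
def pvCheckB (b : List Int) (m : Int) (state : Int) : Bool :=
  let pg := (PySem.List.pyRange 0 m 1).foldl
    (fun (pg : Int × Bool) i =>
      if pg.2 then
        if PySem.Int.band (pvShr state i.toNat) 1 ≠ 0 then
          if (i - pg.1) ∈ b then (i, pg.2) else (pg.1, false)
        else pg
      else pg)  -- loop left by `break`
    (-1, true)
  pg.2 && decide ((m - pg.1) ∈ b)

-- sum of dp.get(ch | t, 0) over all submasks t of (c restricted to bits < i)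
-- (Python tests `i == 0`; the `i ≤ 0` guard only makes the same recursion total — i is never negative here)
def pvSubsum (i ch c : Int) (dp : PySem.Dict Int Int) : Int :=
  if h : i ≤ 0 then dp.getD ch 0
  else
    let bit : Int := pvShl 1 (i - 1).toNat
    if PySem.Int.band c bit ≠ 0 then
      pvSubsum (i - 1) ch c dp + pvSubsum (i - 1) (PySem.Int.bor ch bit) c dp
    else pvSubsum (i - 1) ch c dp
termination_by i.toNat
decreasing_by all_goals omega

def buildWall_alt (height : Int) (width : Int) (bricks : List Int) : Int :=
  let MOD : Int := 1000000007
  let b := PySem.Set.ofList bricks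
  let m := width - 1
  let full := pvShl 1 m.toNat - 1
  let plans := (PySem.List.pyRange 0 (pvShl 1 m.toNat) 1).foldl
    (fun acc state => if pvCheckB b m state then acc ++ [state] else acc) []
  let dp0 := plans.foldl (fun (d : PySem.Dict Int Int) p => d.insert p 1) PySem.Dict.empty
  let dpN := (PySem.List.pyRange 0 (height - 1) 1).foldl
    (fun d _i =>
      plans.foldl
        (fun (nd : PySem.Dict Int Int) p =>
          nd.insert p (PySem.Int.mod (pvSubsum m 0 (PySem.Int.bxor full p) d) MOD))
        PySem.Dict.empty) dp0
  PySem.Int.mod (dpN.values.foldl (fun a v => a + v) 0) MOD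

-- ===== PRECONDITION & SPEC =====
-- Pre_ excludes width ≤ 0, where A raises ValueError (`1 << m` with m < 0), and height ≤ 0,
-- where A raises IndexError (dp[0][j] on an empty dp) whenever at least one valid row plan
-- exists — when none exists A happens to return 0 there, and B returns 0 there as well.
def Pre_buildWall (height : Int) (width : Int) (bricks : List Int) : Prop :=
  1 ≤ height ∧ 1 ≤ width
instance (height : Int) (width : Int) (bricks : List Int) : Decidable (Pre_buildWall height width bricks) := by
  unfold Pre_buildWall; infer_instance

def pvWitness_buildWall : Int × Int × List Int := (2, 3, [1, 2])

def Spec_buildWall (height : Int) (width : Int) (bricks : List Int) (out : Int) : Prop := out = buildWall_alt height width bricks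
instance (height : Int) (width : Int) (bricks : List Int) (out : Int) : Decidable (Spec_buildWall height width bricks out) := by unfold Spec_buildWall; infer_instance

-- ===== CLAIM (what is proved, stated in full; the proofs are below) =====
def Claim_equal_buildWall : Prop := ∀ (height : Int) (width : Int) (bricks : List Int), Dom_buildWall height width bricks → Pre_buildWall height width bricks → Spec_buildWall height width bricks (buildWall height width bricks)

-- ===== LEMMAS AND PROOFS =====

theorem pvShl_one (n : Nat) : pvShl 1 n = ((2 ^ n : Nat) : Int) := by
  unfold pvShl; rw [Int.shiftLeft_eq]; push_cast; ring

def pvChain (b : List Int) (m prev : Int) : List Int → Bool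
  | [] => decide ((m - prev) ∈ b)
  | j :: rest => decide ((j - prev) ∈ b) && pvChain b m j rest


theorem pv_subm_iff (x c : Nat) :
    x &&& c = x ↔ ∀ j, x.testBit j = true → c.testBit j = true := by
  constructor
  · intro h j hj
    have := congrArg (fun z => Nat.testBit z j) h
    simp only [Nat.testBit_and] at this
    rw [hj] at this; simpa using this
  · intro h
    apply Nat.eq_of_testBit_eq
    intro j
    simp only [Nat.testBit_and]
    by_cases hx : x.testBit j
    · simp [hx, h j hx]
    · simp [hx]

theorem pv_and_zero_iff (x y : Nat) :
    x &&& y = 0 ↔ ∀ j, ¬(x.testBit j = true ∧ y.testBit j = true) := by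
  constructor
  · rintro h j ⟨hx, hy⟩
    have := congrArg (fun z => Nat.testBit z j) h
    simp [Nat.testBit_and, hx, hy] at this
  · intro h
    apply Nat.eq_of_testBit_eq
    intro j
    simp only [Nat.testBit_and, Nat.zero_testBit]
    by_cases hx : x.testBit j
    · by_cases hy : y.testBit j
      · exact absurd ⟨hx, hy⟩ (h j)
      · simp [hy]
    · simp [hx]

theorem pv_compat (mN pN t : Nat) (hp : pN < 2 ^ mN) (ht : t < 2 ^ mN) :
    (t &&& ((2 ^ mN - 1) ^^^ pN) = t) ↔ pN &&& t = 0 := by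
  rw [pv_subm_iff, pv_and_zero_iff]
  constructor
  · intro h j ⟨hpj, htj⟩
    have := h j htj
    simp [Nat.testBit_xor, Nat.testBit_two_pow_sub_one, hpj] at this
    have : pN.testBit j = false := Nat.testBit_lt_two_pow (lt_of_lt_of_le hp (Nat.pow_le_pow_right (by norm_num) (by omega)))
    simp [this] at hpj
  · intro h j htj
    have hlt : j < mN := by
      by_contra hge
      have : t.testBit j = false := Nat.testBit_lt_two_pow (lt_of_lt_of_le ht (Nat.pow_le_pow_right (by norm_num) (by omega)))
      simp [this] at htj
    have hpj : pN.testBit j = false := by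
      by_contra hpj
      exact h j ⟨by simpa using hpj, htj⟩
    simp [Nat.testBit_xor, Nat.testBit_two_pow_sub_one, hlt, hpj]


theorem pv_bittest (s i : Int) (hs : 0 ≤ s) :
    decide (PySem.Int.band s (pvShl 1 i.toNat) ≠ 0)
    = decide (PySem.Int.band (pvShr s i.toNat) 1 ≠ 0) := by
  obtain ⟨sN, rfl⟩ := Int.eq_ofNat_of_zero_le hs
  rw [pvShl_one]
  have hshr : pvShr ((sN : Nat) : Int) i.toNat = ((sN >>> i.toNat : Nat) : Int) := by
    unfold pvShr; simp
  have hone : (1 : Int) = ((1 : Nat) : Int) := by norm_num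
  rw [hshr, hone]
  simp only [PySem.Int.band_natCast]
  have h1 : (sN &&& 2 ^ i.toNat ≠ 0) ↔ sN.testBit i.toNat = true := by
    rw [Nat.and_two_pow]
    cases h : sN.testBit i.toNat <;> simp
  have h2 : (sN >>> i.toNat &&& 1 ≠ 0) ↔ sN.testBit i.toNat = true := by
    rw [Nat.and_one_is_mod, Nat.testBit_eq_decide_div_mod_eq, Nat.shiftRight_eq_div_pow]
    constructor
    · intro h; simp only [decide_eq_true_eq]; omega
    · intro h; simp only [decide_eq_true_eq] at h; omega
  simp only [ne_eq, Nat.cast_eq_zero]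
  rw [decide_eq_decide]
  rw [← ne_eq, ← ne_eq] at *
  exact h1.trans h2.symm

theorem pv_foldl_mod_add' (M : Int) (hM : 0 < M) (l : List Int) :
    l.foldl (fun r v => PySem.Int.mod (r + v) M) 0 = PySem.Int.mod l.sum M := by
  induction l using List.reverseRecOn with
  | nil => simp [PySem.Int.mod_eq_emod_of_pos hM]
  | append_singleton xs x ih =>
    rw [List.foldl_append, List.foldl_cons, List.foldl_nil, ih, List.sum_append]
    simp only [List.sum_cons, List.sum_nil, add_zero]
    rw [PySem.Int.mod_eq_emod_of_pos hM, PySem.Int.mod_eq_emod_of_pos hM, PySem.Int.mod_eq_emod_of_pos hM]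
    conv_rhs => rw [Int.add_emod]
    conv_lhs => rw [Int.add_emod, Int.emod_emod_of_dvd _ dvd_rfl]

theorem pv_dict_getD (g : Int → Int) : ∀ (l : List Int) (d : PySem.Dict Int Int) (q : Int),
    (l.foldl (fun d p => d.insert p (g p)) d).getD q 0
    = if q ∈ l then g q else d.getD q 0 := by
  intro l
  induction l using List.reverseRecOn with
  | nil => intro d q; simp
  | append_singleton xs x ih =>
    intro d q
    rw [List.foldl_append, List.foldl_cons, List.foldl_nil, PySem.Dict.getD_insert, ih]
    by_cases hqx : q = x
    · simp [hqx]
    · by_cases hq : q ∈ xs <;> simp [hqx, hq]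


theorem pv_two_pow_add_or {t : Nat} (i : Nat) (ht : t < 2 ^ i) : 2 ^ i + t = 2 ^ i ||| t := by
  simpa using Nat.two_pow_add_eq_or_of_lt ht 1

theorem pv_or_submask (i t cN : Nat) :
    ((2 ^ i ||| t) &&& cN = 2 ^ i ||| t) ↔ (cN.testBit i = true ∧ t &&& cN = t) := by
  rw [pv_subm_iff, pv_subm_iff]
  constructor
  · intro hall
    refine ⟨hall i ?_, fun j hj => hall j ?_⟩
    · simp [Nat.testBit_or, Nat.testBit_two_pow_self]
    · simp [Nat.testBit_or, hj]
  · rintro ⟨hc, hall⟩ j hj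
    rw [Nat.testBit_or] at hj
    rcases Bool.or_eq_true_iff.mp hj with h2 | h2
    · rw [Nat.testBit_two_pow] at h2
      simpa [← (by simpa using h2 : i = j)] using hc
    · exact hall j h2

theorem pv_subsum (dp : PySem.Dict Int Int) (cN : Nat) : ∀ (iN : Nat) (chN : Nat),
    (∀ j, j < iN → chN.testBit j = false) →
    pvSubsum (iN : Int) (chN : Int) (cN : Int) dp
    = (((List.range (2^iN)).filter (fun t => t &&& cN = t)).map
        (fun t => dp.getD (((chN ||| t : Nat) : Int)) 0)).sum := by
  intro iN
  induction iN with
  | zero =>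
    intro chN _
    rw [pvSubsum]
    norm_num [List.range_succ]
  | succ iN ih =>
    intro chN h
    rw [pvSubsum]
    have hpos : ¬ ((iN + 1 : Nat) : Int) ≤ 0 := by push_cast; omega
    rw [dif_neg hpos]
    have hidx : (((iN + 1 : Nat) : Int) - 1).toNat = iN := by push_cast; omega
    have hbit : pvShl 1 (((iN + 1 : Nat) : Int) - 1).toNat = ((2 ^ iN : Nat) : Int) := by
      rw [hidx, pvShl_one]
    have hprev : ((iN + 1 : Nat) : Int) - 1 = ((iN : Nat) : Int) := by push_cast; ring
    have hsplit : List.range (2 ^ (iN + 1)) = List.range (2 ^ iN) ++ (List.range (2 ^ iN)).map (2 ^ iN + ·) := by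
      have : 2 ^ (iN + 1) = 2 ^ iN + 2 ^ iN := by rw [pow_succ]; ring
      rw [this, List.range_add]
    have hband : PySem.Int.band ((cN : Nat) : Int) (((2 ^ iN : Nat) : Int)) = (((cN &&& 2 ^ iN : Nat)) : Int) :=
      PySem.Int.band_natCast cN (2 ^ iN)
    -- second half of the range, rewritten pointwise
    have hsecond : ∀ (q : Nat → Bool),
        ((List.range (2 ^ iN)).map (2 ^ iN + ·)).filter q
        = ((List.range (2 ^ iN)).filter (fun t => q (2 ^ iN + t))).map (2 ^ iN + ·) := by
      intro q; rw [List.filter_map]; rfl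
    by_cases hc : cN.testBit iN
    · -- bit iN of c is set: both sub-branches contribute
      have hcond : PySem.Int.band ((cN : Nat) : Int) (pvShl 1 (((iN + 1 : Nat) : Int) - 1).toNat) ≠ 0 := by
        rw [hbit, hband]
        rw [Nat.and_two_pow, hc]
        exact Int.natCast_ne_zero.mpr (by simp)
      rw [if_pos hcond, hbit, hprev]
      have hch' : ∀ j, j < iN → chN.testBit j = false := fun j hj => h j (by omega)
      have hch2 : ∀ j, j < iN → (chN ||| 2 ^ iN).testBit j = false := by
        intro j hj
        rw [Nat.testBit_or, h j (by omega), Nat.testBit_two_pow_of_ne (by omega)]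
        rfl
      have hbor : PySem.Int.bor ((chN : Nat) : Int) (((2 ^ iN : Nat)) : Int) = (((chN ||| 2 ^ iN : Nat)) : Int) :=
        PySem.Int.bor_natCast chN (2 ^ iN)
      rw [hbor, ih chN hch', ih (chN ||| 2 ^ iN) hch2]
      rw [hsplit, List.filter_append, List.map_append, List.sum_append]
      congr 1
      rw [hsecond, List.map_map]
      have hfc : (List.range (2 ^ iN)).filter (fun t => decide ((2 ^ iN + t) &&& cN = 2 ^ iN + t))
               = (List.range (2 ^ iN)).filter (fun t => t &&& cN = t) := by
        apply List.filter_congr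
        intro t htm
        have htlt : t < 2 ^ iN := List.mem_range.mp htm
        rw [pv_two_pow_add_or iN htlt]
        simp only [decide_eq_decide]
        rw [pv_or_submask]
        simp [hc]
      rw [hfc]
      congr 1
      apply List.map_congr_left
      intro t htm
      have htlt : t < 2 ^ iN := List.mem_range.mp (List.mem_of_mem_filter htm)
      simp only [Function.comp_apply]
      rw [pv_two_pow_add_or iN htlt, ← Nat.lor_assoc]
    · -- bit iN of c is clear: the shifted half contributes nothing
      have hcond : ¬ (PySem.Int.band ((cN : Nat) : Int) (pvShl 1 (((iN + 1 : Nat) : Int) - 1).toNat) ≠ 0) := by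
        rw [hbit, hband, Nat.and_two_pow]
        simp [hc]
      rw [if_neg hcond, hprev]
      have hch' : ∀ j, j < iN → chN.testBit j = false := fun j hj => h j (by omega)
      rw [ih chN hch']
      rw [hsplit, List.filter_append, List.map_append, List.sum_append]
      have hfc : ((List.range (2 ^ iN)).map (2 ^ iN + ·)).filter (fun t => t &&& cN = t) = [] := by
        rw [hsecond]
        have : (List.range (2 ^ iN)).filter (fun t => decide ((2 ^ iN + t) &&& cN = 2 ^ iN + t)) = [] := by
          rw [List.filter_eq_nil_iff]
          intro t htm
          have htlt : t < 2 ^ iN := List.mem_range.mp htm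
          rw [pv_two_pow_add_or iN htlt]
          simp only [decide_eq_true_eq]
          rw [pv_or_submask]
          simp [hc]
        rw [this]; rfl
      rw [hfc]
      simp


theorem pv_fold_false (g : Int → Bool) (l : List Int) :
    l.foldl (fun fl i => if fl then g i else false) false = false := by
  induction l with
  | nil => rfl
  | cons x xs ih => simpa using ih

theorem pv_flag_shift (b : List Int) (x : Int) (temp : List Int) (a c : Int) (ha : 1 ≤ a)
    (init : Bool) :
    (PySem.List.pyRange (a+1) (c+1) 1).foldl
      (fun fl i => if fl then
          decide ((PySem.List.pyGetD (x::temp) i 0 - PySem.List.pyGetD (x::temp) (i-1) 0) ∈ b)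
        else false) init
    = (PySem.List.pyRange a c 1).foldl
      (fun fl i => if fl then
          decide ((PySem.List.pyGetD temp i 0 - PySem.List.pyGetD temp (i-1) 0) ∈ b)
        else false) init := by
  rw [PySem.List.pyRange_one (a+1) (c+1), PySem.List.pyRange_one a c]
  have he : c + 1 - (a + 1) = c - a := by ring
  rw [he, List.foldl_map, List.foldl_map]
  apply List.foldl_ext
  intro fl k hk
  have h1 : a + 1 + (k:Int) = ((a.toNat + 1 + k : Nat) : Int) := by omega
  have h2 : a + 1 + (k:Int) - 1 = ((a.toNat + k : Nat) : Int) := by omega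
  have h3 : a + (k:Int) = ((a.toNat + k : Nat) : Int) := by omega
  have h4 : a + (k:Int) - 1 = ((a.toNat - 1 + k : Nat) : Int) := by omega
  rw [h2, h1, h4, h3]
  simp only [PySem.List.pyGetD_natCast]
  have g1 : (x::temp).getD (a.toNat + 1 + k) 0 = temp.getD (a.toNat + k) 0 := by
    have : a.toNat + 1 + k = (a.toNat + k) + 1 := by omega
    rw [this, List.getD_cons_succ]
  have g2 : (x::temp).getD (a.toNat + k) 0 = temp.getD (a.toNat - 1 + k) 0 := by
    have : a.toNat + k = (a.toNat - 1 + k) + 1 := by omega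
    rw [this, List.getD_cons_succ]
  rw [g1, g2]

theorem pv_flag_eq_chain (b : List Int) (m : Int) : ∀ (bits : List Int) (prev : Int),
    (PySem.List.pyRange 1 (PySem.List.len (prev :: (bits ++ [m]))) 1).foldl
      (fun fl i => if fl then
          decide ((PySem.List.pyGetD (prev :: (bits ++ [m])) i 0
                   - PySem.List.pyGetD (prev :: (bits ++ [m])) (i-1) 0) ∈ b)
        else false) true
    = pvChain b m prev bits := by
  intro bits
  induction bits with
  | nil =>
    intro prev
    have hlen : PySem.List.len (prev :: ([] ++ [m])) = 2 := by
      simp [PySem.List.len_eq]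
    rw [hlen]
    have : PySem.List.pyRange 1 2 1 = [1] := by
      have := PySem.List.pyRange_one_singleton (a := 1)
      norm_num at this
      exact this
    rw [this]
    simp only [List.foldl_cons, List.foldl_nil, if_true]
    norm_num [pvChain, PySem.List.pyGetD_zero_cons]
    rw [show ((1:Int)) = ((1:Nat):Int) by norm_num, PySem.List.pyGetD_natCast]
    simp
  | cons j rest ih =>
    intro prev
    simp only [List.cons_append]
    have hlen : PySem.List.len (prev :: j :: (rest ++ [m])) = ((rest.length + 3 : Nat) : Int) := by
      simp [PySem.List.len_eq]; ring
    rw [hlen]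
    have hlt : (1:Int) < ((rest.length + 3 : Nat) : Int) := by push_cast; omega
    rw [PySem.List.pyRange_one_cons hlt, List.foldl_cons]
    have h1 : PySem.List.pyGetD (prev :: j :: (rest ++ [m])) 1 0 = j := by
      rw [show (1:Int) = ((1:Nat):Int) by norm_num, PySem.List.pyGetD_natCast]; simp
    have h0 : PySem.List.pyGetD (prev :: j :: (rest ++ [m])) (1 - 1) 0 = prev := by
      norm_num [PySem.List.pyGetD_zero_cons]
    simp only [h1, h0, if_true]
    have hc1 : ((rest.length + 3 : Nat) : Int) = ((rest.length + 2 : Nat) : Int) + 1 := by push_cast; ring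
    have hshift := pv_flag_shift b prev (j :: (rest ++ [m])) 1 ((rest.length + 2 : Nat) : Int)
      (by norm_num) (decide ((j - prev) ∈ b))
    rw [hc1]
    refine Eq.trans hshift ?_
    have hlen2 : ((rest.length + 2 : Nat) : Int) = PySem.List.len (j :: (rest ++ [m])) := by
      simp [PySem.List.len_eq]; ring
    rw [hlen2]
    cases hd : decide ((j - prev) ∈ b) with
    | false =>
      refine Eq.trans (pv_fold_false _ _) ?_
      simp [pvChain, hd]
    | true =>
      refine Eq.trans (ih j) ?_
      simp [pvChain, hd]

theorem pv_checkA_eq (b : List Int) (m state : Int) :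
    pvCheckA b m state
    = pvChain b m (-1)
        ((PySem.List.pyRange 0 m 1).filter
          (fun i => decide (PySem.Int.band state (pvShl 1 i.toNat) ≠ 0))) := by
  unfold pvCheckA
  dsimp only
  rw [PySem.List.foldl_append_ite_eq_filter]
  have hT : ([-1] ++ (([] : List Int) ++ (PySem.List.pyRange 0 m 1).filter
          (fun i => decide (PySem.Int.band state (pvShl 1 i.toNat) ≠ 0))) ++ [m])
      = ((-1) : Int) :: (((PySem.List.pyRange 0 m 1).filter
          (fun i => decide (PySem.Int.band state (pvShl 1 i.toNat) ≠ 0))) ++ [m]) := by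
    simp
  rw [hT]
  exact pv_flag_eq_chain b m _ (-1)

theorem pv_scan_dead (b : List Int) (state : Int) (l : List Int) (prev : Int) :
    l.foldl (fun (pg : Int × Bool) i =>
      if pg.2 then
        if PySem.Int.band (pvShr state i.toNat) 1 ≠ 0 then
          if (i - pg.1) ∈ b then (i, pg.2) else (pg.1, false)
        else pg
      else pg) (prev, false) = (prev, false) := by
  induction l with
  | nil => rfl
  | cons x xs ih => simpa using ih

theorem pv_scan_eq_chain (b : List Int) (m state : Int) : ∀ (l : List Int) (prev : Int),
    ((l.foldl (fun (pg : Int × Bool) i =>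
        if pg.2 then
          if PySem.Int.band (pvShr state i.toNat) 1 ≠ 0 then
            if (i - pg.1) ∈ b then (i, pg.2) else (pg.1, false)
          else pg
        else pg) (prev, true)).2
      && decide ((m - (l.foldl (fun (pg : Int × Bool) i =>
        if pg.2 then
          if PySem.Int.band (pvShr state i.toNat) 1 ≠ 0 then
            if (i - pg.1) ∈ b then (i, pg.2) else (pg.1, false)
          else pg
        else pg) (prev, true)).1) ∈ b))
    = pvChain b m prev (l.filter (fun i => decide (PySem.Int.band (pvShr state i.toNat) 1 ≠ 0))) := by
  intro l
  induction l with
  | nil => intro prev; simp [pvChain]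
  | cons i l ih =>
    intro prev
    simp only [List.foldl_cons, if_true]
    by_cases hb : PySem.Int.band (pvShr state i.toNat) 1 ≠ 0
    · rw [if_pos hb]
      by_cases hm : (i - prev) ∈ b
      · rw [if_pos hm, ih i, List.filter_cons]
        simp [hb, hm, pvChain]
      · rw [if_neg hm, pv_scan_dead, List.filter_cons]
        simp [hb, hm, pvChain]
    · rw [if_neg hb]
      rw [ih prev, List.filter_cons]
      simp [hb]

theorem pv_checkB_eq (b : List Int) (m state : Int) :
    pvCheckB b m state
    = pvChain b m (-1)
        ((PySem.List.pyRange 0 m 1).filter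
          (fun i => decide (PySem.Int.band (pvShr state i.toNat) 1 ≠ 0))) := by
  unfold pvCheckB
  dsimp only
  exact pv_scan_eq_chain b m state (PySem.List.pyRange 0 m 1) (-1)

theorem pv_check_eq (b : List Int) (m state : Int) (hs : 0 ≤ state) :
    pvCheckA b m state = pvCheckB b m state := by
  rw [pv_checkA_eq, pv_checkB_eq]
  congr 1
  apply List.filter_congr
  intro i _
  exact pv_bittest state i hs


theorem pv_fold_iterate {α : Type} (f : α → α) : ∀ (l : List Int) (init : α),
    l.foldl (fun s _ => f s) init = f^[l.length] init := by
  intro l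
  induction l with
  | nil => intro init; rfl
  | cons x xs ih =>
    intro init
    simp only [List.foldl_cons, List.length_cons, Function.iterate_succ_apply]
    exact ih (f init)

-- Prop-condition variants of the mod-fold and ite-sum lemmas
theorem pv_foldl_mod_add_p (M : Int) (hM : 0 < M) (l : List Int) (g : Int → Int)
    (p : Int → Prop) [DecidablePred p] :
    l.foldl (fun acc k => if p k then PySem.Int.mod (acc + g k) M else acc) 0
    = PySem.Int.mod (((l.filter (fun k => decide (p k))).map g).sum) M := by
  induction l using List.reverseRecOn with
  | nil => simp [PySem.Int.mod_eq_emod_of_pos hM]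
  | append_singleton xs x ih =>
    rw [List.foldl_append, List.foldl_cons, List.foldl_nil, ih, List.filter_append]
    by_cases h : p x
    · simp only [h, if_true, List.filter_cons, decide_eq_true_eq, List.filter_nil]
      simp only [List.map_append, List.sum_append, List.map_cons, List.map_nil,
        List.sum_cons, List.sum_nil]
      rw [PySem.Int.mod_eq_emod_of_pos hM, PySem.Int.mod_eq_emod_of_pos hM,
        PySem.Int.mod_eq_emod_of_pos hM]
      conv_rhs => rw [Int.add_emod]
      conv_lhs => rw [Int.add_emod, Int.emod_emod_of_dvd _ dvd_rfl]
      ring_nf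
    · simp [h]

theorem pv_sum_ite_p (P : Nat → Prop) [DecidablePred P] (f : Nat → Int) : ∀ (l : List Nat),
    (l.map (fun t => if P t then f t else 0)).sum
    = ((l.filter (fun t => decide (P t))).map f).sum := by
  intro l
  induction l with
  | nil => rfl
  | cons x xs ih =>
    by_cases h : P x <;> simp [h, ih]

-- the canonical plan list shared by both sides
def canonPL (b : List Int) (mN : Nat) : List Int :=
  ((List.range (2 ^ mN)).filter (fun t => pvCheckA b ((mN : Nat) : Int) ((t : Nat) : Int))).map
    (fun t => ((t : Nat) : Int))

theorem pv_plans_reprA (b : List Int) (mN : Nat) :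
    (PySem.List.pyRange 0 (pvShl 1 mN) 1).foldl
      (fun acc state => if pvCheckA b ((mN : Nat) : Int) state then acc ++ [state] else acc) []
    = canonPL b mN := by
  rw [PySem.List.foldl_append_if_eq_filter, pvShl_one, PySem.List.pyRange_one]
  simp only [sub_zero, Int.toNat_natCast, zero_add, List.nil_append]
  rw [List.filter_map]
  rfl

theorem pv_plans_reprB (b : List Int) (mN : Nat) :
    (PySem.List.pyRange 0 (pvShl 1 mN) 1).foldl
      (fun acc state => if pvCheckB b ((mN : Nat) : Int) state then acc ++ [state] else acc) []
    = canonPL b mN := by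
  rw [PySem.List.foldl_append_if_eq_filter, pvShl_one, PySem.List.pyRange_one]
  simp only [sub_zero, Int.toNat_natCast, zero_add, List.nil_append]
  rw [List.filter_map]
  unfold canonPL
  congr 1
  apply List.filter_congr
  intro t _
  exact (pv_check_eq b ((mN : Nat) : Int) ((t : Nat) : Int) (by positivity)).symm

theorem pv_canon_nodup (b : List Int) (mN : Nat) : (canonPL b mN).Nodup := by
  unfold canonPL
  exact ((List.nodup_range.filter _).map Nat.cast_injective)

theorem pv_mem_canon (b : List Int) (mN : Nat) (t : Nat) :
    ((t : Nat) : Int) ∈ canonPL b mN ↔ (t < 2 ^ mN ∧ pvCheckA b ((mN : Nat) : Int) ((t : Nat) : Int) = true) := by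
  unfold canonPL
  simp [List.mem_map, List.mem_filter, List.mem_range, Nat.cast_inj]

-- the common layer-value function: value of a plan after n transfer steps
def pvF (PL : List Int) : Nat → Int → Int
  | 0, _ => 1
  | n+1, p => PySem.Int.mod
      (((PL.filter (fun k => decide (PySem.Int.band p k = 0))).map (pvF PL n)).sum)
      1000000007

-- the per-plan layer value B computes from the dict equals the filtered sum A computes
theorem pv_layer_value (b : List Int) (mN : Nat) (g : Int → Int) (p : Int)
    (hp : p ∈ canonPL b mN) :
    PySem.Int.mod (pvSubsum ((mN : Nat) : Int) 0
        (PySem.Int.bxor (pvShl 1 mN - 1) p)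
        ((canonPL b mN).foldl (fun d q => d.insert q (g q)) PySem.Dict.empty)) 1000000007
    = PySem.Int.mod
        ((((canonPL b mN).filter (fun k => decide (PySem.Int.band p k = 0))).map g).sum)
        1000000007 := by
  obtain ⟨pN, hpN, rfl⟩ : ∃ pN, (pN ∈ (List.range (2 ^ mN)).filter
      (fun t => pvCheckA b ((mN : Nat) : Int) ((t : Nat) : Int))) ∧ ((pN : Nat) : Int) = p := by
    unfold canonPL at hp
    obtain ⟨pN, h1, h2⟩ := List.mem_map.mp hp
    exact ⟨pN, h1, h2⟩
  have hplt : pN < 2 ^ mN := List.mem_range.mp (List.mem_of_mem_filter hpN)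
  have hone : (1:Nat) ≤ 2 ^ mN := Nat.one_le_two_pow
  have hfull : pvShl 1 mN - 1 = (((2 ^ mN - 1 : Nat)) : Int) := by
    rw [pvShl_one, Nat.cast_sub hone]; norm_num
  rw [hfull, PySem.Int.bxor_natCast]
  have hsub := pv_subsum ((canonPL b mN).foldl (fun d q => d.insert q (g q)) PySem.Dict.empty)
    ((2 ^ mN - 1) ^^^ pN) mN 0 (fun j _ => Nat.zero_testBit j)
  norm_num at hsub
  rw [hsub]
  congr 1
  -- replace dict lookups by the function values
  rw [List.map_congr_left (g := fun t => if ((t : Nat) : Int) ∈ canonPL b mN then g ((t : Nat) : Int) else 0)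
    (fun t _ => by rw [pv_dict_getD]; by_cases h : ((t : Nat) : Int) ∈ canonPL b mN <;> simp [h])]
  rw [pv_sum_ite_p (fun t => ((t : Nat) : Int) ∈ canonPL b mN) (fun t => g ((t : Nat) : Int))]
  -- right-hand side: pull the filter through the cast map
  conv_rhs => rw [show canonPL b mN = ((List.range (2 ^ mN)).filter
      (fun t => pvCheckA b ((mN : Nat) : Int) ((t : Nat) : Int))).map (fun t => ((t : Nat) : Int)) from rfl]
  rw [List.filter_map, List.filter_filter, List.filter_filter, List.map_map]
  rw [show ((g ∘ fun (t : Nat) => ((t : Nat) : Int))) = (fun (t : Nat) => g ((t : Nat) : Int)) from rfl]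
  congr 1
  congr 1
  apply List.filter_congr
  intro t htm
  have htlt : t < 2 ^ mN := List.mem_range.mp htm
  have hcompat := pv_compat mN pN t hplt htlt
  have hmem : (((t : Nat) : Int) ∈ canonPL b mN) ↔ pvCheckA b ((mN : Nat) : Int) ((t : Nat) : Int) = true := by
    rw [pv_mem_canon]
    exact and_iff_right htlt
  have hband : PySem.Int.band ((pN : Nat) : Int) ((t : Nat) : Int) = (((pN &&& t : Nat)) : Int) :=
    PySem.Int.band_natCast pN t
  simp only [Function.comp_apply, hband, Nat.cast_eq_zero]
  rw [Bool.and_comm]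
  congr 1
  · exact decide_eq_decide.mpr hcompat
  · calc decide (((t : Nat) : Int) ∈ canonPL b mN)
        = decide (pvCheckA b ((mN : Nat) : Int) ((t : Nat) : Int) = true) := decide_eq_decide.mpr hmem
      _ = pvCheckA b ((mN : Nat) : Int) ((t : Nat) : Int) := by simp

-- A's layer iteration
theorem pv_iterA (PL : List Int) : ∀ K,
    (fun prev => PL.map (fun pj => (PL.zip prev).foldl
        (fun acc kv => if PySem.Int.band pj kv.1 = 0
          then PySem.Int.mod (acc + kv.2) 1000000007 else acc) 0))^[K]
      (PL.map (fun _ => (1:Int)))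
    = PL.map (pvF PL K) := by
  intro K
  induction K with
  | zero => simp [pvF]
  | succ K ih =>
    rw [Function.iterate_succ_apply', ih]
    apply List.map_congr_left
    intro pj _
    have hz : PL.zip (PL.map (pvF PL K)) = PL.map (fun k => (k, pvF PL K k)) := by
      have h0 : (List.map id PL).zip (List.map (pvF PL K) PL)
          = List.map (fun a => (id a, pvF PL K a)) PL := List.zip_map'
      simpa using h0
    rw [hz, List.foldl_map]
    rw [pv_foldl_mod_add_p 1000000007 (by norm_num) PL (pvF PL K)
      (fun k => PySem.Int.band pj k = 0)]
    rfl

-- B's layer iteration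
theorem pv_iterB (b : List Int) (mN : Nat) : ∀ K,
    (fun d => (canonPL b mN).foldl (fun nd p => nd.insert p
        (PySem.Int.mod (pvSubsum ((mN : Nat) : Int) 0
          (PySem.Int.bxor (pvShl 1 mN - 1) p) d) 1000000007)) PySem.Dict.empty)^[K]
      ((canonPL b mN).foldl (fun d p => d.insert p (1:Int)) PySem.Dict.empty)
    = (canonPL b mN).foldl (fun d p => d.insert p (pvF (canonPL b mN) K p)) PySem.Dict.empty := by
  intro K
  induction K with
  | zero => simp [pvF]
  | succ K ih =>
    rw [Function.iterate_succ_apply', ih]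
    apply PySem.List.foldl_congr_mem'
    intro p hp nd
    congr 1
    exact pv_layer_value b mN (pvF (canonPL b mN) K) p hp

-- values of the dict built over the (nodup) plan list
theorem pv_values_mkD (b : List Int) (mN : Nat) (g : Int → Int) :
    ((canonPL b mN).foldl (fun d p => d.insert p (g p)) PySem.Dict.empty).values
    = (canonPL b mN).map g := by
  have h := PySem.Dict.items_foldl_insert_fresh (l := canonPL b mN) (k := fun p => p)
    (v := g) (d := PySem.Dict.empty) (fun a _ => PySem.Dict.contains_empty a)
    (by simpa using pv_canon_nodup b mN)
  have he : (PySem.Dict.empty : PySem.Dict Int Int).items = [] := rfl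
  simp only [PySem.Dict.values, h, he]
  simp [Function.comp]

-- ===== VERDICT (by name: the statement is the Claim_ definition above) =====
theorem buildWall_spec : Claim_equal_buildWall := by
  unfold Claim_equal_buildWall
  intro height width bricks _hdom hpre
  obtain ⟨hh, hw⟩ := hpre
  unfold Spec_buildWall buildWall buildWall_alt
  dsimp only
  have hm0 : 0 ≤ width - 1 := by omega
  have hmm : width - 1 = (((width - 1).toNat : Nat) : Int) := by omega
  set mN : Nat := (width - 1).toNat with hmN
  rw [hmm]
  set b : List Int := PySem.Set.ofList bricks with hbdef
  rw [pv_plans_reprA b mN, pv_plans_reprB b mN]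
  rw [pv_fold_iterate (f := fun prev => (canonPL b mN).map (fun pj =>
      ((canonPL b mN).zip prev).foldl (fun acc kv => if PySem.Int.band pj kv.1 = 0
        then PySem.Int.mod (acc + kv.2) 1000000007 else acc) 0))]
  rw [pv_fold_iterate (f := fun d => (canonPL b mN).foldl (fun nd p => nd.insert p
      (PySem.Int.mod (pvSubsum ((mN : Nat) : Int) 0
        (PySem.Int.bxor (pvShl 1 mN - 1) p) d) 1000000007)) PySem.Dict.empty)]
  rw [PySem.List.length_pyRange_one, PySem.List.length_pyRange_one]
  have hlen : (height - 1 - 0).toNat = (height - 1).toNat := by norm_num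
  rw [hlen]
  rw [pv_iterA (canonPL b mN) ((height - 1).toNat), pv_iterB b mN ((height - 1).toNat)]
  rw [pv_values_mkD b mN (pvF (canonPL b mN) ((height - 1).toNat))]
  rw [pv_foldl_mod_add' 1000000007 (by norm_num)]
  rw [show ((canonPL b mN).map (pvF (canonPL b mN) ((height - 1).toNat))).foldl
      (fun a v => a + v) 0
    = ((canonPL b mN).map (pvF (canonPL b mN) ((height - 1).toNat))).sum by
      rw [List.sum_eq_foldl]]
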